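-- pv_equiv track=rewrite | github.com/dncolomer/Agent | debug-build-output/src/utils/comments.py | extract_comments_from_code
-- ===== SOURCE A (Python) =====
-- def extract_comments_from_code(code):
--     """
--     Extracts inline comments from the given code.
--
--     Args:
--     code (str): The code containing inline comments.
--
--     Returns:
--     list: A list of extracted inline comments.
--     """
--     comments = []
--     lines = code.split('\n')
--     for line in lines:
--         line = line.strip()
--         if '#' in line:
--             comment = line.split('#', 1)[1].strip()
--             comments.append(comment)
--     return comments
-- ===== SOURCE B (Python) =====
-- def extract_comments_from_code(code):
--     comments = []
--     i, n = 0, len(code)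
--     while i < n:
--         if code[i] == '#':
--             j = i + 1
--             while j < n and code[j] != '\n':
--                 j += 1
--             comments.append(code[i + 1:j].strip())
--             i = j + 1
--         else:
--             i += 1
--     return comments
-- ===== Notes on version B (the rewrite author's own statement) =====
-- stated objective: alternative
-- what changed: Instead of splitting the code into lines and running strip/'in'/split('#',1) on every line, B makes one direct index scan over the string, jumping from each '#' to the end of its line and emitting the stripped capture.
import Mathlib
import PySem

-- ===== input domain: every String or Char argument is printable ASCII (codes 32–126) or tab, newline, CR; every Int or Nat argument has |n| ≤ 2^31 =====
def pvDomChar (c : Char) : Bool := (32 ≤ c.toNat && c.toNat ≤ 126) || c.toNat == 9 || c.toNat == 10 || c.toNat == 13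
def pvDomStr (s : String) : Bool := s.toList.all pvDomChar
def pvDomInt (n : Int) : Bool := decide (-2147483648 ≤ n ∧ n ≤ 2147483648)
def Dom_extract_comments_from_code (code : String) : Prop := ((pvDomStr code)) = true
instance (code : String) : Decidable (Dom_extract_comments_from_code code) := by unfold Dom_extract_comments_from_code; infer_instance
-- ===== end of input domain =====

-- B replaces A's split-into-lines + per-line strip/split pipeline by one direct index scan of the
-- string that jumps from '#' to end-of-line (objective: alternative single-pass traversal; no speed claim).

-- ===== PORT A =====
-- A: split code on '\n'; for each line, strip it, and if it contains '#', append strip(line.split('#',1)[1]).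
def extract_comments_from_code (code : String) : List String :=
  (PySem.Chars.splitOn code.toList ['\n']).foldl
    (fun comments line =>
      let l := PySem.Chars.strip line
      if PySem.Chars.isIn ['#'] l then
        comments ++ [String.ofList (PySem.Chars.strip
          (PySem.List.pyGetD (PySem.Chars.splitOnMax l ['#'] 1) 1 []))]
      else comments)
    []

-- ===== PORT B =====
-- B: single scan over the characters; at each '#', the inner while (j) = takeWhile/dropWhile to the
-- next newline, emit the stripped capture, resume after the newline; otherwise advance one character.
def pvScanB : List Char → List String
  | [] => []
  | c :: cs =>
    if c = '#' then
      String.ofList (PySem.Chars.strip (cs.takeWhile (· ≠ '\n'))) ::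
        pvScanB ((cs.dropWhile (· ≠ '\n')).drop 1)
    else pvScanB cs
termination_by cs => cs.length
decreasing_by
  · have h := List.length_dropWhile_le (fun c => decide (c ≠ '\n')) cs
    simp only [List.length_cons, List.length_drop]
    omega
  · simp

def extract_comments_from_code_alt (code : String) : List String :=
  pvScanB code.toList

-- ===== PRECONDITION & SPEC =====
def Spec_extract_comments_from_code (code : String) (out : List String) : Prop := out = extract_comments_from_code_alt code
instance (code : String) (out : List String) : Decidable (Spec_extract_comments_from_code code out) := by unfold Spec_extract_comments_from_code; infer_instance

-- ===== CLAIM (what is proved, stated in full; the proofs are below) =====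
def Claim_equal_extract_comments_from_code : Prop := ∀ (code : String), Dom_extract_comments_from_code code → Spec_extract_comments_from_code code (extract_comments_from_code code)

-- ===== LEMMAS AND PROOFS =====

-- canonical split of a character list on '\n' (pre = current line prefix)
def pvSplitNl : List Char → List Char → List (List Char)
  | pre, [] => [pre]
  | pre, c :: cs => if c = '\n' then pre :: pvSplitNl [] cs else pvSplitNl (pre ++ [c]) cs

-- the text after the first '#'
def pvAfterHash (l : List Char) : List Char := (l.dropWhile (· ≠ '#')).drop 1

-- what one line contributes to the result
def pvG (l : List Char) : Option String :=
  if '#' ∈ l then some (String.ofList (PySem.Chars.strip (pvAfterHash l))) else none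

lemma pv_splitOn_go (fuel : Nat) : ∀ (l cur : List Char) (acc : List (List Char)),
    l.length < fuel →
    PySem.Chars.splitOn.go ['\n'] fuel l cur acc = acc.reverse ++ pvSplitNl cur.reverse l := by
  induction fuel with
  | zero => intro l cur acc h; omega
  | succ f ih =>
    intro l cur acc h
    cases l with
    | nil => simp [PySem.Chars.splitOn.go, pvSplitNl]
    | cons c rest =>
      by_cases hc : c = '\n'
      · subst hc
        rw [PySem.Chars.splitOn.go]
        simp only [List.isPrefixOf, BEq.rfl, Bool.and_self, if_true,
          List.length_cons, List.length_nil, Nat.zero_add, List.drop_succ_cons, List.drop_zero]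
        rw [ih rest [] (cur.reverse :: acc) (by simp at h ⊢; omega)]
        simp [pvSplitNl]
      · rw [PySem.Chars.splitOn.go]
        have hpre : List.isPrefixOf ['\n'] (c :: rest) = false := by
          simp [List.isPrefixOf]; intro hh; exact hc hh.symm
        simp only [hpre, Bool.false_eq_true, if_false]
        rw [ih rest (c :: cur) acc (by simp at h ⊢; omega)]
        simp [pvSplitNl, hc]

lemma pv_splitOn (cs : List Char) : PySem.Chars.splitOn cs ['\n'] = pvSplitNl [] cs := by
  have := pv_splitOn_go (cs.length + 1) cs [] [] (by omega)
  simpa [PySem.Chars.splitOn] using this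

lemma pv_splitMax0 (fuel : Nat) : ∀ (l cur : List Char) (acc : List (List Char)),
    PySem.Chars.splitOnMax.go ['#'] fuel 0 l cur acc = acc.reverse ++ [cur.reverse ++ l] := by
  induction fuel with
  | zero => intro l cur acc; rw [PySem.Chars.splitOnMax.go]; simp
  | succ f _ =>
    intro l cur acc
    cases l with
    | nil => rw [PySem.Chars.splitOnMax.go]; simp; omega
    | cons c rest => rw [PySem.Chars.splitOnMax.go]; simp

lemma pv_splitMax1 (fuel : Nat) : ∀ (l cur : List Char) (acc : List (List Char)),
    l.length < fuel →
    PySem.Chars.splitOnMax.go ['#'] fuel 1 l cur acc =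
      if '#' ∈ l then
        acc.reverse ++ [cur.reverse ++ l.takeWhile (· ≠ '#'), (l.dropWhile (· ≠ '#')).drop 1]
      else acc.reverse ++ [cur.reverse ++ l] := by
  induction fuel with
  | zero => intro l cur acc h; omega
  | succ f ih =>
    intro l cur acc h
    cases l with
    | nil => rw [PySem.Chars.splitOnMax.go]; simp; omega
    | cons c rest =>
      by_cases hc : c = '#'
      · subst hc
        rw [PySem.Chars.splitOnMax.go]
        simp only [List.isPrefixOf, BEq.rfl, Bool.and_self, if_true, one_ne_zero, if_false,
          List.length_cons, List.length_nil, Nat.zero_add, List.drop_succ_cons, List.drop_zero,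
          Nat.sub_self]
        rw [pv_splitMax0]
        simp
      · rw [PySem.Chars.splitOnMax.go]
        have hpre : List.isPrefixOf ['#'] (c :: rest) = false := by
          simp [List.isPrefixOf]; intro hh; exact hc hh.symm
        simp only [hpre, Bool.false_eq_true, if_false, one_ne_zero]
        rw [ih rest (c :: cur) acc (by simp at h ⊢; omega)]
        by_cases hm : '#' ∈ rest
        · have hmem : '#' ∈ (c :: rest) := List.mem_cons_of_mem _ hm
          rw [if_pos hm, if_pos hmem,
            List.takeWhile_cons_of_pos (by simp [hc]), List.dropWhile_cons_of_pos (by simp [hc])]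
          simp
        · have hmem : ¬ '#' ∈ (c :: rest) := by
            simp only [List.mem_cons, not_or]; exact ⟨fun hh => hc hh.symm, hm⟩
          rw [if_neg hm, if_neg hmem]
          simp

lemma pv_splitMax1_top (l : List Char) :
    PySem.Chars.splitOnMax l ['#'] 1 =
      if '#' ∈ l then [l.takeWhile (· ≠ '#'), (l.dropWhile (· ≠ '#')).drop 1]
      else [l] := by
  have := pv_splitMax1 (l.length + 1) l [] [] (by omega)
  rw [PySem.Chars.splitOnMax]
  norm_num at this ⊢
  rw [this]

lemma pv_mem_dropWhile_iff {p : Char → Bool} {a : Char} (h : p a = false) (l : List Char) :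
    a ∈ l.dropWhile p ↔ a ∈ l := by
  constructor
  · intro hm; exact (List.dropWhile_sublist p).mem hm
  · intro hm
    rw [← List.takeWhile_append_dropWhile (p := p) (l := l)] at hm
    rcases List.mem_append.1 hm with h1 | h2
    · have := List.mem_takeWhile_imp h1; rw [h] at this; cases this
    · exact h2

lemma pv_mem_strip_iff {a : Char} (h : PySem.Chars.isspace a = false) (l : List Char) :
    a ∈ PySem.Chars.strip l ↔ a ∈ l := by
  simp only [PySem.Chars.strip, PySem.Chars.rstrip, PySem.Chars.lstrip, List.mem_reverse]
  rw [pv_mem_dropWhile_iff h, List.mem_reverse, pv_mem_dropWhile_iff h]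

lemma pv_dropWhile_dropWhile {p q : Char → Bool} (h : ∀ a, p a = true → q a = true)
    (l : List Char) : (l.dropWhile p).dropWhile q = l.dropWhile q := by
  induction l with
  | nil => simp
  | cons c cs ih =>
    by_cases hp : p c = true
    · rw [List.dropWhile_cons_of_pos hp, List.dropWhile_cons_of_pos (h c hp), ih]
    · rw [List.dropWhile_cons_of_neg hp]

lemma pv_isspace_imp_ne_hash : ∀ a : Char, PySem.Chars.isspace a = true → (decide (a ≠ '#')) = true := by
  intro a ha
  by_cases h : a = '#'
  · subst h; exact absurd ha (by decide)
  · simp [h]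

lemma pv_afterHash_lstrip (l : List Char) :
    pvAfterHash (PySem.Chars.lstrip l) = pvAfterHash l := by
  simp only [pvAfterHash, PySem.Chars.lstrip]
  rw [pv_dropWhile_dropWhile pv_isspace_imp_ne_hash]

lemma pv_rstrip_append_ws (z ws : List Char) (h : ∀ c ∈ ws, PySem.Chars.isspace c = true) :
    PySem.Chars.rstrip (z ++ ws) = PySem.Chars.rstrip z := by
  simp only [PySem.Chars.rstrip, List.reverse_append]
  rw [List.dropWhile_append]
  have hnil : ws.reverse.dropWhile PySem.Chars.isspace = [] :=
    List.dropWhile_eq_nil_iff.2 (fun x hx => h x (List.mem_reverse.1 hx))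
  simp [hnil]

lemma pv_strip_append_ws (y ws : List Char) (h : ∀ c ∈ ws, PySem.Chars.isspace c = true) :
    PySem.Chars.strip (y ++ ws) = PySem.Chars.strip y := by
  simp only [PySem.Chars.strip, PySem.Chars.lstrip]
  rw [List.dropWhile_append]
  by_cases hy : y.dropWhile PySem.Chars.isspace = []
  · have hws : ws.dropWhile PySem.Chars.isspace = [] := List.dropWhile_eq_nil_iff.2 h
    simp [hy, hws, PySem.Chars.rstrip]
  · rw [if_neg (by simpa [List.isEmpty_iff] using hy)]
    rw [pv_rstrip_append_ws _ _ h]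

lemma pv_strip_afterHash (l : List Char) (h : '#' ∈ l) :
    PySem.Chars.strip (pvAfterHash (PySem.Chars.strip l)) =
      PySem.Chars.strip (pvAfterHash l) := by
  rw [← pv_afterHash_lstrip l]
  set m := PySem.Chars.lstrip l with hm
  have hmem : '#' ∈ m := by
    rw [hm]; unfold PySem.Chars.lstrip
    exact (pv_mem_dropWhile_iff (by decide) l).2 h
  -- decompose m = rstrip m ++ trailing whitespace
  have hdecomp : m = PySem.Chars.rstrip m ++ (m.reverse.takeWhile PySem.Chars.isspace).reverse := by
    have : (PySem.Chars.rstrip m ++ (m.reverse.takeWhile PySem.Chars.isspace).reverse) = m := by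
      simp only [PySem.Chars.rstrip, ← List.reverse_append, List.takeWhile_append_dropWhile,
        List.reverse_reverse]
    exact this.symm
  have hws : ∀ c ∈ (m.reverse.takeWhile PySem.Chars.isspace).reverse, PySem.Chars.isspace c = true := by
    intro c hc; exact List.mem_takeWhile_imp (List.mem_reverse.1 hc)
  have hmemr : '#' ∈ PySem.Chars.rstrip m := by
    rcases List.mem_append.1 (hdecomp ▸ hmem) with h1 | h2
    · exact h1
    · have := hws _ h2; exact absurd this (by decide)
  have hne : (PySem.Chars.rstrip m).dropWhile (· ≠ '#') ≠ [] := by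
    intro hnil
    have := List.dropWhile_eq_nil_iff.1 hnil _ hmemr
    simp at this
  have hafter : pvAfterHash m = pvAfterHash (PySem.Chars.rstrip m) ++ (m.reverse.takeWhile PySem.Chars.isspace).reverse := by
    conv_lhs => rw [hdecomp]
    unfold pvAfterHash
    rw [List.dropWhile_append]
    rw [if_neg (by simp only [List.isEmpty_iff]; exact hne)]
    rw [List.drop_append_of_le_length]
    exact Nat.one_le_iff_ne_zero.2 (by simpa [List.length_eq_zero_iff] using hne)
  show PySem.Chars.strip (pvAfterHash (PySem.Chars.rstrip m)) = PySem.Chars.strip (pvAfterHash m)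
  rw [hafter, pv_strip_append_ws _ _ hws]

lemma pv_gA_eq (l : List Char) :
    (if PySem.Chars.isIn ['#'] (PySem.Chars.strip l) then
        some (String.ofList (PySem.Chars.strip
          (PySem.List.pyGetD (PySem.Chars.splitOnMax (PySem.Chars.strip l) ['#'] 1) 1 [])))
      else none) = pvG l := by
  have hmem : PySem.Chars.isIn ['#'] (PySem.Chars.strip l) = true ↔ '#' ∈ l := by
    rw [PySem.Chars.isIn_iff_infix, List.singleton_infix_iff, pv_mem_strip_iff (by decide)]
  by_cases h : '#' ∈ l
  · have h1 : PySem.Chars.isIn ['#'] (PySem.Chars.strip l) = true := hmem.2 h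
    have h2 : '#' ∈ PySem.Chars.strip l := (pv_mem_strip_iff (by decide) l).2 h
    rw [if_pos h1, pvG, if_pos h]
    rw [pv_splitMax1_top, if_pos h2]
    have : PySem.List.pyGetD [(PySem.Chars.strip l).takeWhile (· ≠ '#'),
        ((PySem.Chars.strip l).dropWhile (· ≠ '#')).drop 1] (1 : Int) [] =
        ((PySem.Chars.strip l).dropWhile (· ≠ '#')).drop 1 := by
      simp [pysem]
    rw [this]
    have := pv_strip_afterHash l h
    unfold pvAfterHash at this
    rw [this]
    rfl
  · have h1 : ¬ PySem.Chars.isIn ['#'] (PySem.Chars.strip l) = true := fun hh => h (hmem.1 hh)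
    rw [if_neg h1, pvG, if_neg h]

lemma pv_A_lines (lines : List (List Char)) (init : List String) :
    lines.foldl
      (fun comments line =>
        let l := PySem.Chars.strip line
        if PySem.Chars.isIn ['#'] l then
          comments ++ [String.ofList (PySem.Chars.strip
            (PySem.List.pyGetD (PySem.Chars.splitOnMax l ['#'] 1) 1 []))]
        else comments) init = init ++ lines.filterMap pvG := by
  induction lines generalizing init with
  | nil => simp
  | cons l rest ih =>
    simp only [List.foldl_cons, List.filterMap_cons]
    rw [ih]
    have := pv_gA_eq l
    by_cases h : '#' ∈ l
    · rw [pvG, if_pos h] at this ⊢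
      split at this
      · simp only [Option.some.injEq] at this
        show (if PySem.Chars.isIn ['#'] (PySem.Chars.strip l) = true then _ else _) ++ _ = _
        split
        · rw [this]; simp
        · simp_all
      · cases this
    · rw [pvG, if_neg h] at this ⊢
      show (if PySem.Chars.isIn ['#'] (PySem.Chars.strip l) = true then _ else _) ++ _ = _
      split at this
      · cases this
      · split
        · simp_all
        · simp

lemma pv_splitNl_eq (cs : List Char) : ∀ pre,
    pvSplitNl pre cs =
      (pre ++ cs.takeWhile (· ≠ '\n')) ::
        (if cs.dropWhile (· ≠ '\n') = [] then []
         else pvSplitNl [] ((cs.dropWhile (· ≠ '\n')).drop 1)) := by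
  induction cs with
  | nil => intro pre; simp [pvSplitNl]
  | cons c rest ih =>
    intro pre
    by_cases hc : c = '\n'
    · subst hc
      simp [pvSplitNl, List.takeWhile, List.dropWhile]
    · rw [pvSplitNl, if_neg hc, ih]
      simp [List.takeWhile, List.dropWhile, hc]

lemma pv_scan_eq (n : Nat) : ∀ (cs : List Char), cs.length ≤ n → ∀ pre, '#' ∉ pre →
    (pvSplitNl pre cs).filterMap pvG = pvScanB cs := by
  induction n with
  | zero =>
    intro cs hlen pre hpre
    have : cs = [] := List.length_eq_zero_iff.1 (Nat.le_zero.1 hlen)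
    subst this
    simp [pvSplitNl, pvScanB, pvG, hpre]
  | succ n ih =>
    intro cs hlen pre hpre
    cases cs with
    | nil => simp [pvSplitNl, pvScanB, pvG, hpre]
    | cons c rest =>
      simp only [List.length_cons] at hlen
      by_cases hc : c = '#'
      · subst hc
        rw [pvScanB, if_pos rfl]
        rw [pvSplitNl, if_neg (by decide), pv_splitNl_eq]
        rw [List.filterMap_cons]
        have hhead : pvG ((pre ++ ['#']) ++ rest.takeWhile (· ≠ '\n')) =
            some (String.ofList (PySem.Chars.strip (rest.takeWhile (· ≠ '\n')))) := by
          rw [pvG, if_pos (by simp)]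
          congr 2
          unfold pvAfterHash
          have hp : (pre.dropWhile (· ≠ '#')) = [] :=
            List.dropWhile_eq_nil_iff.2 (fun x hx => by
              simp only [decide_eq_true_eq]; intro hh; exact hpre (hh ▸ hx))
          rw [List.append_assoc, List.dropWhile_append, hp]
          rw [if_pos (by simp)]
          rw [List.singleton_append, List.dropWhile_cons_of_neg (by simp)]
          rfl
        rw [hhead]
        by_cases hd : rest.dropWhile (· ≠ '\n') = []
        · rw [if_pos hd, hd]
          simp [pvScanB]
        · rw [if_neg hd]
          have hlen2 : ((rest.dropWhile (· ≠ '\n')).drop 1).length ≤ n := by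
            have h1 := List.length_dropWhile_le (fun c => decide (c ≠ '\n')) rest
            simp only [List.length_drop]
            omega
          rw [ih _ hlen2 [] (by simp)]
      · rw [pvScanB, if_neg hc]
        by_cases hn : c = '\n'
        · subst hn
          rw [pvSplitNl, if_pos rfl, List.filterMap_cons]
          rw [pvG, if_neg hpre]
          exact ih rest (by omega) [] (by simp)
        · rw [pvSplitNl, if_neg hn]
          refine ih rest (by omega) (pre ++ [c]) ?_
          simp only [List.mem_append, List.mem_singleton, not_or]
          exact ⟨hpre, fun hh => hc hh.symm⟩

-- ===== VERDICT (by name: the statement is the Claim_ definition above) =====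
theorem extract_comments_from_code_spec : Claim_equal_extract_comments_from_code := by
  intro code _
  unfold Spec_extract_comments_from_code extract_comments_from_code extract_comments_from_code_alt
  rw [pv_splitOn, pv_A_lines, List.nil_append]
  exact pv_scan_eq code.toList.length code.toList (le_refl _) [] (by simp)
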